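-- pv_equiv track=rewrite | github.com/alex-ebi/astro_scripts_uibk | astro_scripts_uibk/stellar_modelling.py | change_output_path
-- ===== SOURCE A (Python) =====
-- def change_output_path(com_list: list, output_name: str, key='<input > ') -> list:
--     """
--     Changes the output file path.
--
--     Parameters
--     ----------
--     com_list : list
--         List of lines (i.e. strings) of a DETAIL/SURFACE/Atlas command file.
--
--     output_name : string
--         New output file path.
--
--     key : str
--         String before the output path in the command file. (Default: '<input > ')
--
--     Returns
--     -------
--     list
--         List of lines (i.e. strings) of a DETAIL/SURFACE command file with output file path.
--     """
--     key_found = False  # assign boolean indicating if the key word was found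
--
--     for i, line_string in enumerate(com_list):  # loop over lines in command file
--         if key in line_string:  # find line with key
--             key_found = True  # indicate that the key was found
--             key_loc = line_string.find(key)  # find key location in line
--             # rewrite output name
--             com_list[i] = f'{line_string[:key_loc + len(key)]}{output_name}\n'
--
--     if not key_found:  # raise error if element key is not found in abundance table
--         raise KeyError(f'The key "{key}" was not found in the DETAIL/SURFACE command file.')
--
--     return com_list
-- ===== SOURCE B (Python) =====
-- def change_output_path(com_list: list, output_name: str, key='<input > ') -> list:
--     # Different decomposition: structural recursion builds the rewritten list
--     # back-to-front, threading the "found" flag through return values instead of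
--     # a mutable loop flag with indexed in-place writes; the result is then put
--     # back into the same list object.
--     def go(lines):
--         if not lines:
--             return [], False
--         head, rest = lines[0], lines[1:]
--         new_rest, found = go(rest)
--         if key in head:
--             return [head[:head.find(key) + len(key)] + output_name + '\n'] + new_rest, True
--         return [head] + new_rest, found
--     new_lines, found = go(com_list)
--     if not found:
--         raise KeyError(f'The key "{key}" was not found in the DETAIL/SURFACE command file.')
--     com_list[:] = new_lines
--     return com_list
-- ===== Notes on version B (the rewrite author's own statement) =====
-- stated objective: alternative
-- what changed: Replaces A's flag-carrying enumerate loop with indexed in-place assignment by a structural recursion that rebuilds the list back-to-front and threads the found flag through the recursive return values, writing the result back once.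
import Mathlib
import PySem

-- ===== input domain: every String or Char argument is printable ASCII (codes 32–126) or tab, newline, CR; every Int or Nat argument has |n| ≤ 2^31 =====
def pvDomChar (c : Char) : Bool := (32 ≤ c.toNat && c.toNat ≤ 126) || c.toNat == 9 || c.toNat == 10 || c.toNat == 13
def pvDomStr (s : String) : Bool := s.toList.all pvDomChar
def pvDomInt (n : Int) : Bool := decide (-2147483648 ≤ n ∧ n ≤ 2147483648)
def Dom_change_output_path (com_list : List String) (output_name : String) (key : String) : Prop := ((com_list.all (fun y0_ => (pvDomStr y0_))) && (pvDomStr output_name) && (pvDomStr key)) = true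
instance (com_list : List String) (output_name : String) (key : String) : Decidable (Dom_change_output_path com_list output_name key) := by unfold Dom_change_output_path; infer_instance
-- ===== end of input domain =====

-- B replaces A's flag-carrying index loop with in-place writes by a structural
-- recursion that rebuilds the list back-to-front, threading the found flag through
-- return values; same cost. Both Pythons mutate com_list in place and return the
-- same object; the equivalence proved here is about the RETURN value.

-- ===== PORT A =====
-- A: loop over enumerate(com_list) carrying (the list, key_found); on a match,
-- assign the rewritten line at index i.  (The loop only writes index i at step i,
-- so reading the element from the enumerate pair is exact.)
def change_output_path (com_list : List String) (output_name : String) (key : String) : List String :=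
  let res := (PySem.List.enumerate com_list 0).foldl
    (fun (st : List String × Bool) p =>
      if PySem.Str.isIn key p.2 then
        (PySem.List.pySetD st.1 p.1
          (PySem.Str.join "" [PySem.Str.slice p.2 none (some (PySem.Str.find p.2 key + PySem.Str.len key)), output_name, "\n"]),
         true)
      else st)
    (com_list, false)
  -- if not key_found: Python raises KeyError — excluded by Pre_change_output_path
  res.1

-- ===== PORT B =====
-- B's inner recursion go: returns (rewritten lines, found)
def pvGo (output_name : String) (key : String) : List String → List String × Bool
  | [] => ([], false)
  | head :: rest =>
    let r := pvGo output_name key rest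
    if PySem.Str.isIn key head then
      ((PySem.Str.join "" [PySem.Str.slice head none (some (PySem.Str.find head key + PySem.Str.len key)), output_name, "\n"]) :: r.1, true)
    else (head :: r.1, r.2)

-- B: if found is false, Python raises KeyError (excluded by Pre_); else the rebuilt list
def change_output_path_alt (com_list : List String) (output_name : String) (key : String) : List String :=
  (pvGo output_name key com_list).1

-- ===== PRECONDITION & SPEC =====
-- Pre_ excludes exactly the inputs where both Pythons raise KeyError: no line contains key.
def Pre_change_output_path (com_list : List String) (output_name : String) (key : String) : Prop :=
  ∃ l ∈ com_list, PySem.Str.isIn key l = true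
instance (com_list : List String) (output_name : String) (key : String) : Decidable (Pre_change_output_path com_list output_name key) := by unfold Pre_change_output_path; infer_instance

def pvWitness_change_output_path : List String × String × String :=
  (["model setup", "<input > old/path.out"], "new/path.out", "<input > ")

def Spec_change_output_path (com_list : List String) (output_name : String) (key : String) (out : List String) : Prop := out = change_output_path_alt com_list output_name key
instance (com_list : List String) (output_name : String) (key : String) (out : List String) : Decidable (Spec_change_output_path com_list output_name key out) := by unfold Spec_change_output_path; infer_instance

-- ===== CLAIM =====
def Claim_equal_change_output_path : Prop := ∀ (com_list : List String) (output_name : String) (key : String), Dom_change_output_path com_list output_name key → Pre_change_output_path com_list output_name key → Spec_change_output_path com_list output_name key (change_output_path com_list output_name key)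

-- ===== LEMMAS AND PROOFS =====

-- common per-line rewrite, used only by the proofs
def pvRewriteLine (output_name : String) (key : String) (line : String) : String :=
  if PySem.Str.isIn key line then
    PySem.Str.join "" [PySem.Str.slice line none (some (PySem.Str.find line key + PySem.Str.len key)), output_name, "\n"]
  else line

-- The key_found flag does not influence the list component of A's loop state.
theorem pv_fold_fst (output_name key : String) :
    ∀ (ys : List (Int × String)) (l : List String) (b : Bool),
    (ys.foldl
      (fun (st : List String × Bool) p =>
        if PySem.Str.isIn key p.2 then
          (PySem.List.pySetD st.1 p.1
            (PySem.Str.join "" [PySem.Str.slice p.2 none (some (PySem.Str.find p.2 key + PySem.Str.len key)), output_name, "\n"]),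
           true)
        else st)
      (l, b)).1
    = ys.foldl
        (fun (l : List String) p =>
          if PySem.Str.isIn key p.2 then
            PySem.List.pySetD l p.1 (pvRewriteLine output_name key p.2)
          else l) l := by
  intro ys
  induction ys with
  | nil => intro l b; rfl
  | cons p t ih =>
      intro l b
      simp only [List.foldl_cons]
      by_cases h : PySem.Str.isIn key p.2 = true
      · rw [if_pos h, if_pos h]
        rw [ih]
        have : pvRewriteLine output_name key p.2
            = PySem.Str.join "" [PySem.Str.slice p.2 none (some (PySem.Str.find p.2 key + PySem.Str.len key)), output_name, "\n"] := by
          unfold pvRewriteLine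
          rw [if_pos h]
        rw [this]
      · rw [if_neg h, if_neg h]
        exact ih l b

theorem pv_fold_set_eq_map (output_name key : String) :
    ∀ (xs pre : List String),
    ((PySem.List.enumerate xs (pre.length : Int)).foldl
      (fun (l : List String) p =>
        if PySem.Str.isIn key p.2 then
          PySem.List.pySetD l p.1 (pvRewriteLine output_name key p.2)
        else l) (pre ++ xs))
    = pre ++ xs.map (pvRewriteLine output_name key) := by
  intro xs
  induction xs with
  | nil => intro pre; simp [PySem.List.enumerate_nil]
  | cons x t ih =>
      intro pre
      rw [PySem.List.enumerate_cons, List.foldl_cons]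
      have hstep : (if PySem.Str.isIn key ((pre.length : Int), x).2 then
            PySem.List.pySetD (pre ++ x :: t) ((pre.length : Int), x).1
              (pvRewriteLine output_name key ((pre.length : Int), x).2)
          else pre ++ x :: t)
          = (pre ++ [pvRewriteLine output_name key x]) ++ t := by
        by_cases h : PySem.Str.isIn key x = true
        · rw [if_pos h]
          simp [PySem.List.pySetD_natCast, List.set_append_right, List.cons_append]
        · rw [if_neg h]
          have : pvRewriteLine output_name key x = x := by unfold pvRewriteLine; rw [if_neg h]
          simp [this]
      rw [hstep]
      have hlen : ((pre.length : Int) + 1) = (((pre ++ [pvRewriteLine output_name key x]).length : Int)) := by simp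
      rw [hlen, ih ((pre ++ [pvRewriteLine output_name key x]))]
      simp

-- B's recursion also computes the per-line rewrite map.
theorem pv_go_fst_eq_map (output_name key : String) :
    ∀ (xs : List String), (pvGo output_name key xs).1 = xs.map (pvRewriteLine output_name key) := by
  intro xs
  induction xs with
  | nil => rfl
  | cons x t ih =>
      unfold pvGo
      by_cases h : PySem.Str.isIn key x = true
      · simp only [if_pos h, List.map_cons]
        rw [ih]
        unfold pvRewriteLine
        rw [if_pos h]
      · simp only [if_neg h, List.map_cons]
        rw [ih]
        have : pvRewriteLine output_name key x = x := by unfold pvRewriteLine; rw [if_neg h]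
        rw [this]

-- ===== VERDICT =====
theorem change_output_path_spec : Claim_equal_change_output_path := by
  intro com_list output_name key _ _
  unfold Spec_change_output_path change_output_path change_output_path_alt
  rw [pv_fold_fst, pv_go_fst_eq_map]
  have h := pv_fold_set_eq_map output_name key com_list []
  simpa using h
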